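-- pv_equiv track=rewrite | github.com/Ruslan1351/AOIS | lab3/lab3_functions.py | calc_table_is_implicant_extra
-- ===== SOURCE A (Python) =====
-- def is_implicant_extra(all_const_X, implic_X):
--     new_const_X = all_const_X[:]
--     for i in range(len(implic_X)):
--         new_const_X[i] -= implic_X[i]
--     if all(number_of_X > 0 for number_of_X in new_const_X):
--         return True
--     else:
--         return False
--
-- def calc_table_is_implicant_extra(table, impl_index):
--     all_const_X = [0 for _ in range(len(table[0]))]
--     for i in range(len(table[0])):
--         for j in range(len(table)):
--             if table[j][i] == 'X':
--                 all_const_X[i] += 1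
--     implic_X = [0 for _ in range(len(table[impl_index]))]
--     for i in range(len(table[impl_index])):
--         if table[impl_index][i] == 'X':
--             implic_X[i] += 1
--     if is_implicant_extra(all_const_X, implic_X):
--         return True
--     else:
--         return False
-- ===== SOURCE B (Python) =====
-- def calc_table_is_implicant_extra(table, impl_index):
--     others = list(table)
--     others.pop(impl_index)
--     return all(any(row[i] == 'X' for row in others) for i in range(len(table[0])))
-- ===== Notes on version B (the rewrite author's own statement) =====
-- stated objective: simpler
-- what changed: Drops the per-column count array, the implicant indicator array and the subtraction helper; instead pops the implicant row out of a copy of the table and directly tests, column by column with short-circuiting all/any comprehensions, whether some remaining row still has an 'X' there.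
import Mathlib
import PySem

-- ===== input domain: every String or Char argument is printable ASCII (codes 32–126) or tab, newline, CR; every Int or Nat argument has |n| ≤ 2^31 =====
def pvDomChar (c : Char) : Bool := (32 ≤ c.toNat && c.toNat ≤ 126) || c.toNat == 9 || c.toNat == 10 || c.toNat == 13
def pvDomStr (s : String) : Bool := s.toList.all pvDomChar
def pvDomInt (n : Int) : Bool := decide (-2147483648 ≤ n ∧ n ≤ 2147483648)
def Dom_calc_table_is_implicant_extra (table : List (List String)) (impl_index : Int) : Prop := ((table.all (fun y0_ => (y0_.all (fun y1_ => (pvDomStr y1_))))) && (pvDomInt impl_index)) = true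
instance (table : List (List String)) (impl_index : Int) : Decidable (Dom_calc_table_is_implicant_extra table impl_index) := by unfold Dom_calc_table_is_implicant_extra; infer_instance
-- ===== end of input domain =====

-- B replaces A's per-column X-count arrays and subtraction helper by a direct per-column test
-- ("some row other than the implicant's still has an X in this column"); same cost, simpler decomposition.
-- Pre_ excludes exactly the inputs on which the Python A raises an IndexError.


-- ===== PORT A =====
def is_implicant_extra (all_const_X implic_X : List Int) : Bool :=
  let new_const_X := (List.range implic_X.length).foldl
    (fun acc i => acc.set i (acc.getD i 0 - implic_X.getD i 0)) all_const_X
  new_const_X.all (fun number_of_X => decide (0 < number_of_X))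

def calc_table_is_implicant_extra (table : List (List String)) (impl_index : Int) : Bool :=
  let all_const_X := (List.range (table.headI).length).foldl
    (fun acc i => table.foldl
      (fun acc2 row => if row.getD i "" = "X" then acc2.set i (acc2.getD i 0 + 1) else acc2) acc)
    (List.replicate (table.headI).length 0)
  let implRow := (PySem.List.pyGet? table impl_index).getD []
  let implic_X := (List.range implRow.length).foldl
    (fun acc i => if implRow.getD i "" = "X" then acc.set i (acc.getD i 0 + 1) else acc)
    (List.replicate implRow.length 0)
  if is_implicant_extra all_const_X implic_X then true else false

-- ===== PORT B =====
def calc_table_is_implicant_extra_alt (table : List (List String)) (impl_index : Int) : Bool :=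
  let others := ((PySem.List.pop? table impl_index).map Prod.snd).getD []
  (List.range (table.headI).length).all (fun i =>
    others.any (fun row => decide (row.getD i "" = "X")))

-- ===== PRECONDITION & SPEC =====
-- Pre_ excludes exactly the inputs where the Python A raises an IndexError: an empty table
-- (table[0]), an impl_index outside Python's index range, a row shorter than row 0
-- (table[j][i]), and an implicant row longer than row 0 (new_const_X[i] in is_implicant_extra).
def Pre_calc_table_is_implicant_extra (table : List (List String)) (impl_index : Int) : Prop :=
  table ≠ [] ∧ -(table.length : Int) ≤ impl_index ∧ impl_index < (table.length : Int) ∧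
  (∀ row ∈ table, (table.headI).length ≤ row.length) ∧
  ((PySem.List.pyGet? table impl_index).getD []).length ≤ (table.headI).length
instance (table : List (List String)) (impl_index : Int) : Decidable (Pre_calc_table_is_implicant_extra table impl_index) := by unfold Pre_calc_table_is_implicant_extra; infer_instance

def pvWitness_calc_table_is_implicant_extra : List (List String) × Int :=
  ([["X", "."], [".", "X"], ["X", "X"]], 2)

def Spec_calc_table_is_implicant_extra (table : List (List String)) (impl_index : Int) (out : Bool) : Prop := out = calc_table_is_implicant_extra_alt table impl_index
instance (table : List (List String)) (impl_index : Int) (out : Bool) : Decidable (Spec_calc_table_is_implicant_extra table impl_index out) := by unfold Spec_calc_table_is_implicant_extra; infer_instance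

-- ===== CLAIM (what is proved, stated in full; the proofs are below) =====
def Claim_equal_calc_table_is_implicant_extra : Prop := ∀ (table : List (List String)) (impl_index : Int), Dom_calc_table_is_implicant_extra table impl_index → Pre_calc_table_is_implicant_extra table impl_index → Spec_calc_table_is_implicant_extra table impl_index (calc_table_is_implicant_extra table impl_index)

-- ===== LEMMAS AND PROOFS =====

-- A loop "for i in range(k): l[i] = f(l[i], i)" over an in-place array, abstractly:
-- u touches only position i, so the result is a map over the untouched initial values.
theorem foldl_set_range (u : List Int → Nat → List Int) (f : Int → Nat → Int)
    (hu : ∀ acc i, i < acc.length → u acc i = acc.set i (f (acc.getD i 0) i)) :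
    ∀ (k : Nat) (l : List Int), k ≤ l.length →
      (List.range k).foldl u l
        = (List.range k).map (fun i => f (l.getD i 0) i) ++ l.drop k := by
  intro k
  induction k with
  | zero => intro l _; simp
  | succ k ih =>
    intro l hk
    rw [List.range_succ, List.foldl_append, List.foldl_cons, List.foldl_nil, ih l (by omega)]
    rw [hu _ k (by simp; omega)]
    have hget : (((List.range k).map (fun i => f (l.getD i 0) i)) ++ l.drop k).getD k 0 = l.getD k 0 := by
      simp [List.getD, List.getElem?_append_right, List.getElem?_drop]
    have hdrop : l.drop k = l.getD k 0 :: l.drop (k + 1) := by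
      rw [List.drop_eq_getElem_cons (by omega)]
      congr 1
      rw [List.getD_eq_getElem _ _ (by omega)]
    rw [hget, List.set_append]
    simp only [List.length_map, List.length_range, lt_irrefl, Nat.sub_self]
    rw [hdrop]
    simp

-- A's inner row loop at a fixed column i adds the number of 'X'-rows to slot i.
theorem inner_count (i : Nat) :
    ∀ (rows : List (List String)) (acc : List Int), i < acc.length →
      rows.foldl (fun acc2 row => if row.getD i "" = "X" then acc2.set i (acc2.getD i 0 + 1) else acc2) acc
        = acc.set i (acc.getD i 0 + (rows.countP (fun row => decide (row.getD i "" = "X")) : Int)) := by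
  intro rows
  induction rows with
  | nil =>
    intro acc h
    simp only [List.foldl_nil, List.countP_nil, Nat.cast_zero, add_zero, List.getD,
      List.getElem?_eq_getElem h, Option.getD_some]
    exact (List.set_getElem_self h).symm
  | cons r rs ih =>
    intro acc h
    rw [List.foldl_cons, List.countP_cons]
    by_cases hr : r.getD i "" = "X"
    · rw [if_pos hr, ih _ (by simpa using h)]
      have hg : (acc.set i (acc.getD i 0 + 1)).getD i 0 = acc.getD i 0 + 1 := by
        simp [List.getD, List.getElem?_set_self', List.getElem?_eq_getElem h]
      rw [hg, List.set_set]
      simp only [List.getD] at hr ⊢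
      congr 1
      simp only [hr, decide_true, if_pos]
      push_cast
      ring
    · rw [if_neg hr, ih _ h]
      simp only [List.getD] at hr ⊢
      simp [hr]

-- The counting core: "column i keeps a positive count after removing row k's contribution"
-- is exactly "some row other than row k has an 'X' in column i".
theorem key_count (P : List String → Bool) :
    ∀ (rows : List (List String)) (k : Nat), k < rows.length →
      ((0 : Int) < (rows.countP P : Int) - (if P (rows.getD k []) then 1 else 0)
        ↔ ∃ j, j < rows.length ∧ j ≠ k ∧ P (rows.getD j []) = true) := by
  intro rows
  induction rows with
  | nil => intro k h; simp at h
  | cons r rs ih =>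
    intro k hk
    rw [List.countP_cons]
    have hgd : ∀ (j : Nat) (hj : j < rs.length), rs.getD j [] = rs[j] :=
      fun j hj => List.getD_eq_getElem rs [] hj
    cases k with
    | zero =>
      rw [List.getD_cons_zero]
      constructor
      · intro h
        have hpos : 0 < rs.countP P := by
          by_cases hr : P r = true
          · simp only [if_pos hr] at h; omega
          · simp only [if_neg hr] at h; omega
        obtain ⟨row, hmem, hP⟩ := List.countP_pos_iff.mp hpos
        obtain ⟨j, hj, rfl⟩ := List.mem_iff_getElem.mp hmem
        refine ⟨j + 1, by simp only [List.length_cons]; omega, by omega, ?_⟩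
        rw [List.getD_cons_succ, hgd j hj]; exact hP
      · rintro ⟨j, hj, hj0, hP⟩
        obtain ⟨j', rfl⟩ : ∃ j', j = j' + 1 := ⟨j - 1, by omega⟩
        have hj' : j' < rs.length := by simp only [List.length_cons] at hj; omega
        have hpos : 0 < rs.countP P := List.countP_pos_iff.mpr
          ⟨rs[j'], List.getElem_mem _, by rw [List.getD_cons_succ, hgd j' hj'] at hP; exact hP⟩
        by_cases hr : P r = true
        · simp only [if_pos hr]; omega
        · simp only [if_neg hr]; omega
    | succ k =>
      have hk' : k < rs.length := by simp only [List.length_cons] at hk; omega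
      have hle : (if P (rs.getD k []) then (1:Int) else 0) ≤ (rs.countP P : Int) := by
        by_cases hp : P (rs.getD k []) = true
        · rw [if_pos hp]
          have : 0 < rs.countP P := List.countP_pos_iff.mpr
            ⟨rs[k], List.getElem_mem _, by rw [hgd k hk'] at hp; exact hp⟩
          omega
        · rw [if_neg hp]; exact Int.natCast_nonneg _
      rw [List.getD_cons_succ]
      constructor
      · intro h
        by_cases hr : P r = true
        · exact ⟨0, by simp only [List.length_cons]; omega, by omega, by
            rw [List.getD_cons_zero]; exact hr⟩
        · have h' : (0 : Int) < (rs.countP P : Int) - (if P (rs.getD k []) then 1 else 0) := by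
            simp only [if_neg hr] at h; omega
          obtain ⟨j, hj, hjk, hP⟩ := (ih k hk').mp h'
          refine ⟨j + 1, by simp only [List.length_cons]; omega, by omega, ?_⟩
          rw [List.getD_cons_succ]; exact hP
      · rintro ⟨j, hj, hjk, hP⟩
        cases j with
        | zero =>
          rw [List.getD_cons_zero] at hP
          simp only [if_pos hP]
          omega
        | succ j =>
          have h' := (ih k hk').mpr ⟨j, by simp only [List.length_cons] at hj; omega, by omega, by
            rw [List.getD_cons_succ] at hP; exact hP⟩
          by_cases hr : P r = true
          · simp only [if_pos hr]; omega
          · simp only [if_neg hr]; omega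

-- The two ports agree on every input admitted by Pre_.
theorem ports_agree (table : List (List String)) (impl_index : Int)
    (_hne : table ≠ []) (hlo : -(table.length : Int) ≤ impl_index)
    (hhi : impl_index < (table.length : Int))
    (hrows : ∀ row ∈ table, (table.headI).length ≤ row.length)
    (himpl : ((PySem.List.pyGet? table impl_index).getD []).length ≤ (table.headI).length) :
    calc_table_is_implicant_extra table impl_index
      = calc_table_is_implicant_extra_alt table impl_index := by
  -- notation
  set n := table.length with hn
  set w := (table.headI).length with hw
  -- normalised index
  set k : Nat := (if impl_index < 0 then impl_index + n else impl_index).toNat with hkdef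
  have hk : k < n := by
    rw [hkdef]; split_ifs with hneg <;> omega
  have hidx : (if impl_index < 0 then impl_index + (n : Int) else impl_index) = (k : Nat) := by
    rw [hkdef]; split_ifs with hneg <;> omega
  -- the implicant row
  have hget : PySem.List.pyGet? table impl_index = some (table.getD k []) := by
    rw [List.getD_eq_getElem table [] hk]
    by_cases hneg : impl_index < 0
    · simp only [PySem.List.pyGet?, PySem.List.pyIdx?, if_neg (by omega : ¬ 0 ≤ impl_index)]
      have : n - (-impl_index).toNat = k := by
        simp only [hkdef, if_pos hneg]; omega
      rw [this, if_pos hlo, Option.bind_some, List.getElem?_eq_getElem hk]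
    · have h0 : 0 ≤ impl_index := by omega
      have hkk : impl_index.toNat = k := by simp only [hkdef, if_neg hneg]
      rw [PySem.List.pyGet?_eq_some_getElem _ h0 hhi]
      congr 1
      simp [hkk]
  -- implicant row facts
  rw [hget] at himpl
  simp only [Option.getD_some] at himpl
  have hmem : table.getD k [] ∈ table := by
    rw [List.getD_eq_getElem table [] hk]; exact List.getElem_mem _
  have hm : (table.getD k []).length = w := le_antisymm himpl (hrows _ hmem)
  -- per-column count and implicant indicator
  set cnt : Nat → Int := fun i => (table.countP (fun row => decide (row.getD i "" = "X")) : Int) with hcnt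
  set ind : Nat → Int := fun i => if (table.getD k []).getD i "" = "X" then 1 else 0 with hind
  -- A's all_const_X
  have hA1 : (List.range w).foldl
      (fun acc i => table.foldl
        (fun acc2 row => if row.getD i "" = "X" then acc2.set i (acc2.getD i 0 + 1) else acc2) acc)
      (List.replicate w 0)
      = (List.range w).map cnt := by
    rw [foldl_set_range _ (fun g i => g + cnt i) (fun acc i hi => inner_count i table acc hi) w _ (by simp)]
    simp
  -- A's implic_X
  have hA2 : (List.range (table.getD k []).length).foldl
      (fun acc i => if (table.getD k []).getD i "" = "X" then acc.set i (acc.getD i 0 + 1) else acc)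
      (List.replicate (table.getD k []).length 0)
      = (List.range w).map ind := by
    rw [foldl_set_range _ (fun g i => g + ind i) ?_ _ _ (by simp)]
    · rw [hm]; simp
    · intro acc i hi
      by_cases hx : (table.getD k []).getD i "" = "X"
      · rw [if_pos hx]
        simp only [hind, if_pos hx]
      · rw [if_neg hx]
        simp only [hind, if_neg hx, add_zero]
        rw [List.getD_eq_getElem _ _ hi]
        exact (List.set_getElem_self hi).symm
  -- A's new_const_X inside is_implicant_extra
  have hA3 : is_implicant_extra ((List.range w).map cnt) ((List.range w).map ind)
      = ((List.range w).map (fun i => cnt i - ind i)).all (fun x => decide (0 < x)) := by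
    unfold is_implicant_extra
    dsimp only [List.length_map, List.length_range]
    rw [foldl_set_range _ (fun g i => g - ((List.range w).map ind).getD i 0)
      (fun acc i hi => rfl) _ _ (by simp)]
    rw [List.drop_eq_nil_of_le (by simp), List.append_nil]
    simp only [List.length_map, List.length_range]
    congr 1
    apply List.map_congr_left
    intro i hi
    rw [List.mem_range] at hi
    rw [PySem.List.getD_map_range cnt w i 0 hi, PySem.List.getD_map_range ind w i 0 hi]
  -- put A together
  have hAeq : calc_table_is_implicant_extra table impl_index
      = ((List.range w).map (fun i => cnt i - ind i)).all (fun x => decide (0 < x)) := by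
    unfold calc_table_is_implicant_extra
    rw [hget]
    dsimp only [Option.getD_some]
    rw [hA1, hA2, hA3]
    split
    · rename_i hb; exact hb.symm
    · rename_i hb; exact ((Bool.not_eq_true _).mp hb).symm
  rw [hAeq]
  -- B: pop? removes exactly row k
  have hpop : PySem.List.pop? table impl_index = some (table[k]'hk, table.eraseIdx k) := by
    have hidx' : PySem.List.pyIdx? table.length impl_index = some k := by
      simp only [PySem.List.pyIdx?]
      split_ifs with h1 <;> try omega
      · congr 1; omega
      · congr 1; simp only [hkdef, if_pos (by omega : impl_index < 0)]; omega
    simp [PySem.List.pop?, hidx', List.getElem?_eq_getElem hk]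
  unfold calc_table_is_implicant_extra_alt
  rw [hpop, List.all_map]
  apply Bool.eq_iff_iff.mpr
  simp only [List.all_eq_true, List.mem_range]
  refine forall_congr' fun i => imp_congr_right fun hi => ?_
  simp only [Function.comp_apply, decide_eq_true_eq, List.any_eq_true, Option.map_some,
    Option.getD_some, List.mem_eraseIdx_iff_getElem]
  have hkey := key_count (fun row => decide (row.getD i "" = "X")) table k (by omega)
  simp only [decide_eq_true_eq] at hkey
  rw [hcnt, hind]
  constructor
  · intro h
    obtain ⟨j, hj, hjk, hP⟩ := hkey.mp h
    refine ⟨table[j]'(by omega), ⟨j, by omega, hjk, rfl⟩, ?_⟩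
    rw [← List.getD_eq_getElem table [] (by omega : j < table.length)]; exact hP
  · rintro ⟨row, ⟨j, hjlt, hjk, rfl⟩, hP⟩
    refine hkey.mpr ⟨j, by omega, hjk, ?_⟩
    rw [List.getD_eq_getElem table [] hjlt]; exact hP

-- ===== VERDICT (by name: the statement is the Claim_ definition above) =====
theorem calc_table_is_implicant_extra_spec : Claim_equal_calc_table_is_implicant_extra := by
  intro table impl_index _ hpre
  obtain ⟨hne, hlo, hhi, hrows, himpl⟩ := hpre
  exact ports_agree table impl_index hne hlo hhi hrows himpl
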